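-- pv_equiv track=rewrite | github.com/allen-cell-animated/io-collection | src/io_collection/keys/group_keys.py | group_keys
-- ===== SOURCE A (Python) =====
-- from itertools import groupby
--
-- def group_keys(keys: list[str]) -> dict[str, list[str]]:
--     """
--     Group keys based on individual key parts.
--
--     A key is composed of parts separated by a single underscores (`_`). Keys are
--     grouped such that each key group consists of the subset of keys with the
--     matching part at the given position.
--
--     Returns
--     -------
--     :
--         The map of key groups to keys.
--     """
--
--     parts = [key.split("_") for key in keys]
--     num_parts = len(parts[0])
--
--     if not all(len(part) == num_parts for part in parts):
--         message = "All keys must have the same number of parts"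
--         raise ValueError(message)
--
--     groups = {}
--
--     for group_index in range(num_parts):
--         sorted_keys = sorted(parts, key=lambda k: k[group_index])
--         for group, part in groupby(sorted_keys, key=lambda k: k[group_index]):
--             groups[group] = ["_".join(p) for p in part]
--
--     return groups
-- ===== SOURCE B (Python) =====
-- def group_keys(keys: list[str]) -> dict[str, list[str]]:
--     """Group keys by the value of each underscore-separated part position."""
--     parts = [key.split("_") for key in keys]
--     num_parts = len(parts[0])
--
--     if not all(len(part) == num_parts for part in parts):
--         message = "All keys must have the same number of parts"
--         raise ValueError(message)
--
--     groups = {}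
--
--     for group_index in range(num_parts):
--         pairs = [(part[group_index], "_".join(part)) for part in parts]
--         buckets = {}
--         for value, joined in pairs:
--             buckets.setdefault(value, []).append(joined)
--         for value in sorted(buckets):
--             groups[value] = buckets[value]
--
--     return groups
-- ===== Notes on version B (the rewrite author's own statement) =====
-- stated objective: alternative
-- what changed: Per part position, B builds the groups with one dict pass (bucket by part value) and then sorts only the distinct part values, instead of A's stable sort of all key tuples followed by itertools.groupby.
-- outside the precondition, e.g. on group_keys([]): A raises IndexError, B raises IndexError
import Mathlib
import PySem

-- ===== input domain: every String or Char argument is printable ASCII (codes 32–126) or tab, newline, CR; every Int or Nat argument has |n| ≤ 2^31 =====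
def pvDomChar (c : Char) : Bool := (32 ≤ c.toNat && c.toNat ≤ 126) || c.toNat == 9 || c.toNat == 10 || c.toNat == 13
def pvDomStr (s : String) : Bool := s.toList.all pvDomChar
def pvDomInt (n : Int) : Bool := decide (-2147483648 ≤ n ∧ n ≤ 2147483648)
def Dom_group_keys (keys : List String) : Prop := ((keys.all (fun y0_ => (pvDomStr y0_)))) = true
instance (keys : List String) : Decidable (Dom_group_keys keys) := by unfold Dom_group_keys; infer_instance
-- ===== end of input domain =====

-- B groups each position's part values with one dict pass and sorts only the distinct values,
-- instead of A's stable sort of all keys plus itertools.groupby per position (objective: alternative).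

-- ===== PORT A =====

-- key.split("_"): "_" is a nonempty separator, so split? is always some
def pvSplit (k : String) : List String :=
  (PySem.Str.split? k "_").getD []

-- lambda k: k[group_index]  (in range for every index the loops produce on Pre_ inputs)
def pvKey (i : Int) (p : List String) : String :=
  PySem.List.pyGetD p i ""

-- itertools.groupby(xs, key): maximal runs of equal key, as (key value, run) pairs
def pvGroupby (k : List String → String) : List (List String) → List (String × List (List String))
  | [] => []
  | x :: xs =>
    let s := xs.span (fun y => k y == k x)
    (k x, x :: s.1) :: pvGroupby k s.2
termination_by l => l.length
decreasing_by
  simp only [List.span_eq_takeWhile_dropWhile]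
  exact Nat.lt_succ_of_le (List.length_dropWhile_le _ _)

-- the body of A's outer 'for group_index in range(num_parts)' loop
def pvStepA (parts : List (List String)) (groups : PySem.Dict String (List String)) (i : Int) :
    PySem.Dict String (List String) :=
  let sorted_keys := PySem.List.sorted parts (pvKey i)
  (pvGroupby (pvKey i) sorted_keys).foldl
    (fun g gp => g.insert gp.1 (gp.2.map (fun p => PySem.Str.join "_" p))) groups

def group_keys (keys : List String) : List (String × List String) :=
  let parts := keys.map pvSplit
  let num_parts := PySem.List.len (parts.getD 0 [])   -- parts[0]: Pre_ excludes keys = []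
  -- A's ValueError check raises exactly outside Pre_, so the port proceeds directly
  ((PySem.List.pyRange 0 num_parts 1).foldl (pvStepA parts) PySem.Dict.empty).items

-- ===== PORT B =====

-- the body of B's outer 'for group_index in range(num_parts)' loop
def pvStepB (parts : List (List String)) (groups : PySem.Dict String (List String)) (i : Int) :
    PySem.Dict String (List String) :=
  let pairs := parts.map (fun p => (pvKey i p, PySem.Str.join "_" p))
  -- buckets.setdefault(value, []).append(joined): buckets[value] becomes buckets.get(value, []) + [joined]
  let buckets := pairs.foldl (fun d q => d.modify q.1 [] (fun l => l ++ [q.2])) PySem.Dict.empty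
  (PySem.List.sorted buckets.keys (fun v => v)).foldl
    (fun g v => g.insert v (buckets.getD v [])) groups

def group_keys_alt (keys : List String) : List (String × List String) :=
  let parts := keys.map pvSplit
  let num_parts := PySem.List.len (parts.getD 0 [])
  ((PySem.List.pyRange 0 num_parts 1).foldl (pvStepB parts) PySem.Dict.empty).items

-- ===== PRECONDITION & SPEC =====
-- A raises IndexError on keys = [] (parts[0]) and ValueError when the keys split into
-- different numbers of parts; Pre_ excludes exactly those raising inputs.
def Pre_group_keys (keys : List String) : Prop :=
  keys ≠ [] ∧ ∀ k ∈ keys, (pvSplit k).length = (pvSplit (keys.headD "")).length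
instance (keys : List String) : Decidable (Pre_group_keys keys) := by
  unfold Pre_group_keys; infer_instance

def pvWitness_group_keys : List String := ["a_x", "b_x", "a_y"]

def Spec_group_keys (keys : List String) (out : List (String × List String)) : Prop := out = group_keys_alt keys
instance (keys : List String) (out : List (String × List String)) : Decidable (Spec_group_keys keys out) := by unfold Spec_group_keys; infer_instance

-- ===== CLAIM (what is proved, stated in full; the proofs are below) =====
def Claim_equal_group_keys : Prop := ∀ (keys : List String), Dom_group_keys keys → Pre_group_keys keys → Spec_group_keys keys (group_keys keys)

-- ===== LEMMAS AND PROOFS =====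

-- insertBy skips a prefix none of whose elements fire the comparison
theorem pv_insertBy_append_skip {α : Type} (before : α → α → Bool) (x : α) (pre ys : List α)
    (h : ∀ y ∈ pre, before x y = false) :
    PySem.List.insertBy before x (pre ++ ys) = pre ++ PySem.List.insertBy before x ys := by
  induction pre with
  | nil => rfl
  | cons a t ih =>
    simp only [List.cons_append, PySem.List.insertBy]
    rw [h a List.mem_cons_self]
    simp only [Bool.false_eq_true, if_false]
    exact congrArg (a :: ·) (ih (fun y hy => h y (by simp [hy])))

-- inserting x in front of a list whose head already compares greater
theorem pv_insertBy_cons_fire {α : Type} (before : α → α → Bool) (x y : α) (ys : List α)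
    (h : before x y = true) :
    PySem.List.insertBy before x (y :: ys) = x :: y :: ys := by
  simp [PySem.List.insertBy, h]

-- inserting x into a blockwise list all of whose keys compare strictly greater: x goes first
theorem pv_insertBy_flat {α κ : Type} [LinearOrder κ] (key : α → κ) (x : α) (v : κ)
    (t : List κ) (blk : κ → List α) (hx : key x = v)
    (hkey : ∀ w ∈ t, ∀ y ∈ blk w, key y = w) (hgt : ∀ w ∈ t, v < w) :
    PySem.List.insertBy (fun a b => decide (key a < key b)) x (t.flatMap blk)
      = x :: t.flatMap blk := by
  cases hfm : t.flatMap blk with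
  | nil => simp [PySem.List.insertBy]
  | cons y0 rest =>
    have hy0 : y0 ∈ t.flatMap blk := by rw [hfm]; exact List.mem_cons_self
    obtain ⟨w, hw, hyw⟩ := List.mem_flatMap.mp hy0
    refine pv_insertBy_cons_fire _ _ _ _ ?_
    simp only [decide_eq_true_eq, hx, hkey w hw y0 hyw]
    exact hgt w hw

-- split a strictly increasing list at a member
theorem pv_split_mem {κ : Type} [LinearOrder κ] (S : List κ) (v : κ)
    (hS : S.Pairwise (· < ·)) (hv : v ∈ S) :
    ∃ t1 t2, S = t1 ++ v :: t2 ∧ (∀ w ∈ t1, w < v) ∧ (∀ w ∈ t2, v < w) := by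
  induction S with
  | nil => cases hv
  | cons a S' ih =>
    rcases List.pairwise_cons.mp hS with ⟨ha, hS'⟩
    rcases List.mem_cons.mp hv with rfl | hv'
    · exact ⟨[], S', rfl, by simp, ha⟩
    · obtain ⟨t1, t2, heq, h1, h2⟩ := ih hS' hv'
      exact ⟨a :: t1, t2, by simp [heq],
        fun w hw => by
          rcases List.mem_cons.mp hw with rfl | hw'
          · exact ha v hv'
          · exact h1 w hw', h2⟩

-- split a strictly increasing list around a non-member
theorem pv_split_not_mem {κ : Type} [LinearOrder κ] (S : List κ) (v : κ)
    (hS : S.Pairwise (· < ·)) (hv : v ∉ S) :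
    ∃ t1 t2, S = t1 ++ t2 ∧ (∀ w ∈ t1, w < v) ∧ (∀ w ∈ t2, v < w) := by
  induction S with
  | nil => exact ⟨[], [], rfl, by simp, by simp⟩
  | cons a S' ih =>
    rcases List.pairwise_cons.mp hS with ⟨ha, hS'⟩
    have hav : a ≠ v := fun h => hv (h ▸ List.mem_cons_self)
    rcases lt_or_gt_of_ne hav with hlt | hgt
    · obtain ⟨t1, t2, heq, h1, h2⟩ := ih hS' (fun h => hv (List.mem_cons_of_mem a h))
      exact ⟨a :: t1, t2, by simp [heq],
        fun w hw => by
          rcases List.mem_cons.mp hw with rfl | hw'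
          · exact hlt
          · exact h1 w hw', h2⟩
    · exact ⟨[], a :: S', rfl, by simp,
        fun w hw => by
          rcases List.mem_cons.mp hw with rfl | hw'
          · exact hgt
          · exact lt_trans hgt (ha w hw')⟩

theorem pv_flatMap_congr {α β : Type} {l : List α} {f g : α → List β}
    (h : ∀ a ∈ l, f a = g a) : l.flatMap f = l.flatMap g := by
  induction l with
  | nil => rfl
  | cons a t ih =>
    simp only [List.flatMap_cons]
    rw [h a List.mem_cons_self, ih (fun a ha => h a (List.mem_cons_of_mem _ ha))]

-- span of a passing block followed by failing elements
theorem pv_span_blocks {α : Type} (q : α → Bool) (p r : List α)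
    (hp : ∀ y ∈ p, q y = true) (hr : ∀ y ∈ r, q y = false) :
    (p ++ r).span q = (p, r) := by
  have htr : r.takeWhile q = [] := by
    cases r with
    | nil => rfl
    | cons a r' => simp [hr a List.mem_cons_self]
  have hdr : r.dropWhile q = r := by
    cases r with
    | nil => rfl
    | cons a r' => simp [hr a List.mem_cons_self]
  have hdp : p.dropWhile q = [] := List.dropWhile_eq_nil_iff.mpr hp
  simp only [List.span_eq_takeWhile_dropWhile, List.takeWhile_append_of_pos hp, htr,
    List.dropWhile_append, hdp, hdr, List.append_nil]
  simp

-- sorted of one more element is an insertBy into sorted of the rest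
theorem pv_sorted_snoc {α κ : Type} [LT κ] [DecidableLT κ] (l : List α) (x : α) (key : α → κ) :
    PySem.List.sorted (l ++ [x]) key
      = PySem.List.insertBy (fun a b => decide (key a < key b)) x (PySem.List.sorted l key) := by
  rw [PySem.List.sorted_eq_foldl_insertBy, PySem.List.sorted_eq_foldl_insertBy, List.foldl_append]
  simp only [List.foldl_cons, List.foldl_nil]

-- THE STABILITY THEOREM: a stable key-sort is the sorted distinct values, each replaced by
-- the filter of the original list at that value (original relative order within a value)
theorem pv_sorted_canon {α κ : Type} [LinearOrder κ] [BEq κ] [LawfulBEq κ]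
    (xs : List α) (key : α → κ) :
    PySem.List.sorted xs key
      = (PySem.List.sorted (PySem.Set.ofList (xs.map key)) (fun v => v)).flatMap
          (fun v => xs.filter (fun x => key x == v)) := by
  induction xs using List.reverseRecOn with
  | nil => rfl
  | append_singleton l x ih =>
    rw [pv_sorted_snoc, ih]
    set v := key x with hv
    set S := PySem.List.sorted (PySem.Set.ofList (l.map key)) (fun v => v) with hSdef
    have hS : S.Pairwise (· < ·) := PySem.List.sorted_ofList_pairwise_lt _
    set blk : κ → List α := fun w => l.filter (fun y => key y == w) with hblk
    have hkey : ∀ w, ∀ y ∈ blk w, key y = w := by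
      intro w y hy
      exact beq_iff_eq.mp (List.mem_filter.mp hy).2
    have hmapS : (l ++ [x]).map key = l.map key ++ [v] := by simp [← hv]
    have hofl : PySem.Set.ofList (l.map key ++ [v])
        = PySem.Set.add (PySem.Set.ofList (l.map key)) v := by
      show (l.map key ++ [v]).foldl PySem.Set.add [] = _
      rw [List.foldl_append]
      simp only [List.foldl_cons, List.foldl_nil]
      rfl
    have hblk' : ∀ w, (l ++ [x]).filter (fun y => key y == w)
        = blk w ++ if v == w then [x] else [] := by
      intro w
      rw [List.filter_append, hblk]
      simp only [List.filter_cons, List.filter_nil]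
      rw [← hv]
    by_cases hvm : v ∈ l.map key
    · -- value already present: distinct values unchanged, x appended to its block
      have hvS : v ∈ S := by
        rw [hSdef, PySem.List.mem_sorted, PySem.Set.mem_ofList]; exact hvm
      have hSnew : PySem.Set.ofList ((l ++ [x]).map key) = PySem.Set.ofList (l.map key) := by
        rw [hmapS, hofl, PySem.Set.add_of_mem ((PySem.Set.mem_ofList _ _).mpr hvm)]
      obtain ⟨t1, t2, heq, h1, h2⟩ := pv_split_mem S v hS hvS
      rw [hSnew, ← hSdef, heq]
      have hkt2 : ∀ w ∈ t2, ∀ y ∈ blk w, key y = w := fun w _ y hy => hkey w y hy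
      have hpre : ∀ y ∈ t1.flatMap blk ++ blk v,
          (fun a b => decide (key a < key b)) x y = false := by
        intro y hy
        simp only [decide_eq_false_iff_not, not_lt, ← hv]
        rcases List.mem_append.mp hy with hy1 | hy2
        · obtain ⟨w, hw, hyw⟩ := List.mem_flatMap.mp hy1
          rw [hkey w y hyw]
          exact le_of_lt (h1 w hw)
        · rw [hkey v y hy2]
      have hT1 : t1.flatMap (fun w => (l ++ [x]).filter (fun y => key y == w))
          = t1.flatMap blk :=
        pv_flatMap_congr (fun w hw => by
          rw [hblk' w, if_neg (by simpa using ne_of_gt (h1 w hw)), List.append_nil])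
      have hT2 : t2.flatMap (fun w => (l ++ [x]).filter (fun y => key y == w))
          = t2.flatMap blk :=
        pv_flatMap_congr (fun w hw => by
          rw [hblk' w, if_neg (by simpa using ne_of_lt (h2 w hw)), List.append_nil])
      have hV : (l ++ [x]).filter (fun y => key y == v) = blk v ++ [x] := by
        rw [hblk' v, if_pos (by simp)]
      rw [show List.flatMap blk (t1 ++ v :: t2)
            = (t1.flatMap blk ++ blk v) ++ t2.flatMap blk by
          simp [List.flatMap_append, List.flatMap_cons, List.append_assoc]]
      rw [pv_insertBy_append_skip _ _ _ _ hpre,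
        pv_insertBy_flat key x v t2 blk hv.symm hkt2 h2]
      simp only [List.flatMap_append, List.flatMap_cons, hT1, hT2, hV]
      simp
    · -- value not yet present: it is spliced into the sorted distinct values, with block [x]
      have hvS : v ∉ S := by
        rw [hSdef, PySem.List.mem_sorted, PySem.Set.mem_ofList]; exact hvm
      obtain ⟨t1, t2, heq, h1, h2⟩ := pv_split_not_mem S v hS hvS
      have hSnew : PySem.List.sorted (PySem.Set.ofList ((l ++ [x]).map key)) (fun v => v)
          = t1 ++ v :: t2 := by
        rw [hmapS, hofl,
          PySem.Set.add_of_not_mem (fun h => hvm ((PySem.Set.mem_ofList _ _).mp h))]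
        apply PySem.List.sorted_eq_of_perm_of_pairwise_lt
        · have h0 : (t1 ++ t2).Perm (PySem.Set.ofList (l.map key)) :=
            heq ▸ PySem.List.sorted_perm _ _ false
          exact List.perm_middle.trans
            ((h0.cons v).trans (List.perm_append_singleton v _).symm)
        · have hS12 := heq ▸ hS
          rcases List.pairwise_append.mp hS12 with ⟨pw1, pw2, _⟩
          refine List.pairwise_append.mpr ⟨pw1, List.pairwise_cons.mpr ⟨h2, pw2⟩, ?_⟩
          intro a ha b hb
          rcases List.mem_cons.mp hb with rfl | hb'
          · exact h1 a ha
          · exact lt_trans (h1 a ha) (h2 b hb')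
      rw [hSnew, heq]
      have hblkv : blk v = [] := by
        rw [hblk, List.filter_eq_nil_iff]
        intro y hy hyb
        exact hvm (List.mem_map.mpr ⟨y, hy, beq_iff_eq.mp hyb⟩)
      have hpre : ∀ y ∈ t1.flatMap blk,
          (fun a b => decide (key a < key b)) x y = false := by
        intro y hy
        obtain ⟨w, hw, hyw⟩ := List.mem_flatMap.mp hy
        simp only [decide_eq_false_iff_not, not_lt, ← hv, hkey w y hyw]
        exact le_of_lt (h1 w hw)
      have hT1 : t1.flatMap (fun w => (l ++ [x]).filter (fun y => key y == w))
          = t1.flatMap blk :=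
        pv_flatMap_congr (fun w hw => by
          rw [hblk' w, if_neg (by simpa using ne_of_gt (h1 w hw)), List.append_nil])
      have hT2 : t2.flatMap (fun w => (l ++ [x]).filter (fun y => key y == w))
          = t2.flatMap blk :=
        pv_flatMap_congr (fun w hw => by
          rw [hblk' w, if_neg (by simpa using ne_of_lt (h2 w hw)), List.append_nil])
      have hV : (l ++ [x]).filter (fun y => key y == v) = [x] := by
        rw [hblk' v, if_pos (by simp), hblkv, List.nil_append]
      rw [show List.flatMap blk (t1 ++ t2) = t1.flatMap blk ++ t2.flatMap blk by
          simp [List.flatMap_append]]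
      rw [pv_insertBy_append_skip _ _ _ _ hpre,
        pv_insertBy_flat key x v t2 blk hv.symm (fun w _ y hy => hkey w y hy) h2]
      simp only [List.flatMap_append, List.flatMap_cons, hT1, hT2, hV]
      simp

-- itertools.groupby of a blockwise list with distinct block keys and nonempty blocks
theorem pv_groupby_flat (k : List String → String) (svals : List String)
    (blk : String → List (List String)) (hnd : svals.Nodup)
    (hne : ∀ v ∈ svals, blk v ≠ []) (hkey : ∀ v ∈ svals, ∀ y ∈ blk v, k y = v) :
    pvGroupby k (svals.flatMap blk) = svals.map (fun v => (v, blk v)) := by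
  induction svals with
  | nil => simp [pvGroupby]
  | cons v rest ih =>
    rcases List.nodup_cons.mp hnd with ⟨hvr, hndr⟩
    cases hb : blk v with
    | nil => exact absurd hb (hne v List.mem_cons_self)
    | cons x t =>
      have hkx : k x = v :=
        hkey v List.mem_cons_self x (by rw [hb]; exact List.mem_cons_self)
      have hflat : (v :: rest).flatMap blk = x :: (t ++ rest.flatMap blk) := by
        rw [List.flatMap_cons, hb]; rfl
      have hspan : (t ++ rest.flatMap blk).span (fun y => k y == k x)
          = (t, rest.flatMap blk) := by
        apply pv_span_blocks
        · intro y hy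
          have : k y = v :=
            hkey v List.mem_cons_self y (by rw [hb]; exact List.mem_cons_of_mem _ hy)
          simp [this, hkx]
        · intro y hy
          obtain ⟨w, hw, hyw⟩ := List.mem_flatMap.mp hy
          have : k y = w := hkey w (List.mem_cons_of_mem _ hw) y hyw
          simp only [this, hkx, beq_eq_false_iff_ne, ne_eq]
          exact fun h => hvr (h ▸ hw)
      rw [hflat]
      simp only [pvGroupby]
      rw [hspan]
      simp only [hkx, List.map_cons]
      rw [← hb]
      exact congrArg (List.cons (v, blk v))
        (ih hndr (fun w hw => hne w (List.mem_cons_of_mem _ hw))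
          (fun w hw => hkey w (List.mem_cons_of_mem _ hw)))

-- the two loop bodies agree on every dict and every index
theorem pv_step_eq (parts : List (List String)) (g : PySem.Dict String (List String)) (i : Int) :
    pvStepA parts g i = pvStepB parts g i := by
  simp only [pvStepA, pvStepB]
  have hkeys : ((parts.map (fun p => (pvKey i p, PySem.Str.join "_" p))).foldl
      (fun d q => d.modify q.1 [] (fun l => l ++ [q.2])) PySem.Dict.empty).keys
      = PySem.Set.ofList (parts.map (pvKey i)) := by
    have h := PySem.Dict.keys_foldl_modify_key (κ := String) (ν := List String)
      (parts.map (fun p => (pvKey i p, PySem.Str.join "_" p))) (fun q => q.1) []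
      (fun _ q l => l ++ [q.2]) PySem.Dict.empty
    simpa [List.map_map, PySem.Set.update_nil_left, Function.comp] using h
  have hgetD : ∀ v, ((parts.map (fun p => (pvKey i p, PySem.Str.join "_" p))).foldl
      (fun d q => d.modify q.1 [] (fun l => l ++ [q.2])) PySem.Dict.empty).getD v []
      = (parts.filter (fun p => pvKey i p == v)).map (fun p => PySem.Str.join "_" p) := by
    intro v
    rw [PySem.Dict.getD_foldl_modify_append]
    simp [List.filter_map, List.map_map, Function.comp_def]
  rw [hkeys, pv_sorted_canon parts (pvKey i)]
  set S := PySem.List.sorted (PySem.Set.ofList (parts.map (pvKey i))) (fun v => v) with hSdef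
  have hS : S.Pairwise (· < ·) := PySem.List.sorted_ofList_pairwise_lt _
  rw [pv_groupby_flat (pvKey i) S (fun v => parts.filter (fun p => pvKey i p == v))
      (hS.imp ne_of_lt)
      (fun v hv => by
        have hvm : v ∈ parts.map (pvKey i) := by
          rw [hSdef, PySem.List.mem_sorted, PySem.Set.mem_ofList] at hv; exact hv
        obtain ⟨p, hp, hpk⟩ := List.mem_map.mp hvm
        exact List.ne_nil_of_mem (List.mem_filter.mpr ⟨hp, by simp [hpk]⟩))
      (fun v _ y hy => beq_iff_eq.mp (List.mem_filter.mp hy).2)]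
  rw [List.foldl_map]
  exact PySem.List.foldl_congr_mem _ _ _ _ (fun acc v _ => by rw [hgetD v])

-- ===== VERDICT (by name: the statement is the Claim_ definition above) =====
theorem group_keys_spec : Claim_equal_group_keys := by
  intro keys _ _
  unfold Spec_group_keys
  simp only [group_keys, group_keys_alt]
  rw [show pvStepA (keys.map pvSplit) = pvStepB (keys.map pvSplit) from
    funext fun g => funext fun i => pv_step_eq _ g i]
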